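-- pv_equiv track=rewrite | github.com/afif004/assignment_python | Functions/loop/odd_even_range_sum.py | sum_freq_odd_even
-- ===== SOURCE A (Python) =====
-- def sum_freq_odd_even(mn, mx):
--     odd_count = 0
--     even_count = 0
--     odd_sum = 0
--     even_sum = 0
--
--     for val in range(mn, mx + 1):
--         if val % 2 == 0:
--             even_count += 1
--             even_sum += val
--         else:
--             odd_count += 1
--             odd_sum += val
--
--     return (f"Number of Odd: {odd_count}\nNumber of Even: {even_count}\nSum of Odd: {odd_sum}\nSum of Even: {even_sum}")
-- ===== SOURCE B (Python) =====
-- def sum_freq_odd_even(mn, mx):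
--     if mn > mx:
--         oc = ec = os = es = 0
--     else:
--         ec = mx // 2 - (mn - 1) // 2
--         oc = (mx + 1) // 2 - mn // 2
--         es = 0 if ec == 0 else ec * ((mn + mn % 2) + (mx - mx % 2)) // 2
--         os = 0 if oc == 0 else oc * ((mn + 1 - mn % 2) + (mx - 1 + mx % 2)) // 2
--     return (f"Number of Odd: {oc}\nNumber of Even: {ec}\nSum of Odd: {os}\nSum of Even: {es}")
-- ===== Notes on version B (the rewrite author's own statement) =====
-- stated objective: faster
-- what changed: Replaces A's O(n) loop over range(mn, mx+1) with O(1) closed-form arithmetic-series formulas for the odd/even counts and sums.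
import Mathlib
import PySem

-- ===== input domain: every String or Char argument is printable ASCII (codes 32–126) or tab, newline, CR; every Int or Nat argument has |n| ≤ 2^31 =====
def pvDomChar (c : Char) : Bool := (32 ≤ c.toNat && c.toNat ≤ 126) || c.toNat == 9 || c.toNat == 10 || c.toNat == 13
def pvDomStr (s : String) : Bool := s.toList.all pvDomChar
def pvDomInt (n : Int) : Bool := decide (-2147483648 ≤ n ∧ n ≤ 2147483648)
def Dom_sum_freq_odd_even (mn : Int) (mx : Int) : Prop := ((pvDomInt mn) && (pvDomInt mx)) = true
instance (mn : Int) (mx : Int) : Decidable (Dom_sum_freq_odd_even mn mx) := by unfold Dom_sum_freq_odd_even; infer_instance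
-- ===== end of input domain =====

-- B replaces A's O(n) loop over range(mn, mx+1) with O(1) closed-form arithmetic-series
-- counts and sums (objective: faster, asymptotic).


-- ===== PORT A =====
-- state is (odd_count, even_count, odd_sum, even_sum), exactly A's four accumulators
def pvStepA (s : Int × Int × Int × Int) (val : Int) : Int × Int × Int × Int :=
  if PySem.Int.mod val 2 = 0 then (s.1, s.2.1 + 1, s.2.2.1, s.2.2.2 + val)
  else (s.1 + 1, s.2.1, s.2.2.1 + val, s.2.2.2)

def pvRender (q : Int × Int × Int × Int) : String :=
  "Number of Odd: " ++ PySem.Int.toStr q.1 ++ "\nNumber of Even: " ++ PySem.Int.toStr q.2.1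
    ++ "\nSum of Odd: " ++ PySem.Int.toStr q.2.2.1 ++ "\nSum of Even: " ++ PySem.Int.toStr q.2.2.2

def sum_freq_odd_even (mn : Int) (mx : Int) : String :=
  pvRender ((PySem.List.pyRange mn (mx + 1) 1).foldl pvStepA (0, 0, 0, 0))

-- ===== PORT B =====
def pvClosed (mn mx : Int) : Int × Int × Int × Int :=
  if mn > mx then (0, 0, 0, 0)
  else
    let ec := PySem.Int.floordiv mx 2 - PySem.Int.floordiv (mn - 1) 2
    let oc := PySem.Int.floordiv (mx + 1) 2 - PySem.Int.floordiv mn 2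
    let es := if ec = 0 then 0 else
      PySem.Int.floordiv (ec * ((mn + PySem.Int.mod mn 2) + (mx - PySem.Int.mod mx 2))) 2
    let os := if oc = 0 then 0 else
      PySem.Int.floordiv (oc * ((mn + 1 - PySem.Int.mod mn 2) + (mx - 1 + PySem.Int.mod mx 2))) 2
    (oc, ec, os, es)

def sum_freq_odd_even_alt (mn : Int) (mx : Int) : String := pvRender (pvClosed mn mx)

-- ===== PRECONDITION & SPEC =====
def Spec_sum_freq_odd_even (mn : Int) (mx : Int) (out : String) : Prop := out = sum_freq_odd_even_alt mn mx
instance (mn : Int) (mx : Int) (out : String) : Decidable (Spec_sum_freq_odd_even mn mx out) := by unfold Spec_sum_freq_odd_even; infer_instance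

-- ===== CLAIM (what is proved, stated in full; the proofs are below) =====
def Claim_equal_sum_freq_odd_even : Prop := ∀ (mn : Int) (mx : Int), Dom_sum_freq_odd_even mn mx → Spec_sum_freq_odd_even mn mx (sum_freq_odd_even mn mx)

-- ===== LEMMAS AND PROOFS =====

-- the closed form without the empty-range guard (proof helper); `/` `%` are Int.ediv/emod
def pvClosedCore (mn mx : Int) : Int × Int × Int × Int :=
  ((mx + 1) / 2 - mn / 2,
   mx / 2 - (mn - 1) / 2,
   if (mx + 1) / 2 - mn / 2 = 0 then 0 else
     ((mx + 1) / 2 - mn / 2) * ((mn + 1 - mn % 2) + (mx - 1 + mx % 2)) / 2,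
   if mx / 2 - (mn - 1) / 2 = 0 then 0 else
     (mx / 2 - (mn - 1) / 2) * ((mn + mn % 2) + (mx - mx % 2)) / 2)

theorem pvClosed_eq_core (mn mx : Int) (h : mn - 1 ≤ mx) :
    pvClosed mn mx = pvClosedCore mn mx := by
  have hfd : ∀ a : Int, PySem.Int.floordiv a 2 = a / 2 :=
    fun a => PySem.Int.floordiv_eq_ediv_of_pos (by norm_num)
  have hmd : ∀ a : Int, PySem.Int.mod a 2 = a % 2 :=
    fun a => PySem.Int.mod_eq_emod_of_pos (by norm_num)
  unfold pvClosed pvClosedCore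
  simp only [hfd, hmd]
  by_cases hg : mn > mx
  · rw [if_pos hg]
    have hx : mx = mn - 1 := by omega
    subst hx
    simp
  · rw [if_neg hg]

theorem pvStep_closed (mn mx : Int) (h : mn ≤ mx) :
    pvStepA (pvClosed mn (mx - 1)) mx = pvClosed mn mx := by
  rw [pvClosed_eq_core mn (mx - 1) (by omega), pvClosed_eq_core mn mx (by omega)]
  have hmd : PySem.Int.mod mx 2 = mx % 2 := PySem.Int.mod_eq_emod_of_pos (by norm_num)
  unfold pvStepA pvClosedCore
  simp only [hmd]
  by_cases hp : mx % 2 = 0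
  · rw [if_pos hp]
    simp only [Prod.mk.injEq]
    refine ⟨by omega, by omega, ?_, ?_⟩
    · -- odd sum unchanged when mx is even
      rw [show (mx - 1 + 1) / 2 - mn / 2 = (mx + 1) / 2 - mn / 2 from by omega,
        show mx - 1 - 1 + (mx - 1) % 2 = mx - 1 + mx % 2 from by omega]
    · -- even sum gains mx
      set e : Int := (mx - 1) / 2 - (mn - 1) / 2 with he
      have hE : mx / 2 - (mn - 1) / 2 = e + 1 := by omega
      rw [hE, if_neg (show ¬ e + 1 = 0 from by omega)]
      by_cases he0 : e = 0
      · rw [if_pos he0, he0]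
        have hfe : mn + mn % 2 = mx := by omega
        rw [hfe]
        omega
      · rw [if_neg he0]
        have hq : 2 * ((mn + mn % 2) / 2) = mn + mn % 2 := by omega
        set q : Int := (mn + mn % 2) / 2 with hqd
        have hmx : mx = 2 * q + 2 * e := by omega
        rw [show mn + mn % 2 + (mx - 1 - ((mx - 1) % 2)) = 2 * (2 * q + e - 1) from by omega,
          show mn + mn % 2 + (mx - mx % 2) = 2 * (2 * q + e) from by omega,
          show e * (2 * (2 * q + e - 1)) = 2 * (e * (2 * q + e - 1)) from by ring,
          show (e + 1) * (2 * (2 * q + e)) = 2 * ((e + 1) * (2 * q + e)) from by ring,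
          Int.mul_ediv_cancel_left _ (by norm_num : (2 : Int) ≠ 0),
          Int.mul_ediv_cancel_left _ (by norm_num : (2 : Int) ≠ 0)]
        linear_combination hmx
  · rw [if_neg hp]
    simp only [Prod.mk.injEq]
    refine ⟨by omega, by omega, ?_, ?_⟩
    · -- odd sum gains mx
      set o : Int := (mx - 1 + 1) / 2 - mn / 2 with ho
      have hO : (mx + 1) / 2 - mn / 2 = o + 1 := by omega
      rw [hO, if_neg (show ¬ o + 1 = 0 from by omega)]
      by_cases ho0 : o = 0
      · rw [if_pos ho0, ho0]
        have hfo : mn + 1 - mn % 2 = mx := by omega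
        rw [hfo]
        omega
      · rw [if_neg ho0]
        have hq : 2 * ((mn - mn % 2) / 2) = mn - mn % 2 := by omega
        set q : Int := (mn - mn % 2) / 2 with hqd
        have hmx : mx = 2 * q + 2 * o + 1 := by omega
        rw [show mn + 1 - mn % 2 + (mx - 1 - 1 + (mx - 1) % 2) = 2 * (2 * q + o + 1 - 1) from by omega,
          show mn + 1 - mn % 2 + (mx - 1 + mx % 2) = 2 * (2 * q + o + 1) from by omega,
          show o * (2 * (2 * q + o + 1 - 1)) = 2 * (o * (2 * q + o)) from by ring,
          show (o + 1) * (2 * (2 * q + o + 1)) = 2 * ((o + 1) * (2 * q + o + 1)) from by ring,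
          Int.mul_ediv_cancel_left _ (by norm_num : (2 : Int) ≠ 0),
          Int.mul_ediv_cancel_left _ (by norm_num : (2 : Int) ≠ 0)]
        linear_combination hmx
    · -- even sum unchanged when mx is odd
      rw [show mx / 2 - (mn - 1) / 2 = (mx - 1) / 2 - (mn - 1) / 2 from by omega,
        show mx - 1 - ((mx - 1) % 2) = mx - mx % 2 from by omega]

theorem pvLoop_eq_closed (mn mx : Int) :
    (PySem.List.pyRange mn (mx + 1) 1).foldl pvStepA (0, 0, 0, 0) = pvClosed mn mx := by
  by_cases h : mx < mn
  · rw [PySem.List.pyRange_one_eq_nil (by omega)]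
    simp [pvClosed, show mn > mx from h]
  · push Not at h
    generalize hn : (mx + 1 - mn).toNat = n
    induction n generalizing mx with
    | zero => omega
    | succ k ih =>
      rw [show mx + 1 = mx + 1 by rfl, PySem.List.pyRange_one_succ_right (by omega),
        List.foldl_append]
      simp only [List.foldl_cons, List.foldl_nil]
      by_cases h2 : mn ≤ mx - 1
      · rw [show PySem.List.pyRange mn mx 1 = PySem.List.pyRange mn ((mx - 1) + 1) 1 from by
          norm_num]
        rw [ih (mx - 1) h2 (by omega)]
        exact pvStep_closed mn mx h
      · have hmn : mn = mx := by omega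
        subst hmn
        rw [PySem.List.pyRange_one_eq_nil (by omega)]
        simp only [List.foldl_nil]
        have := pvStep_closed mn mn le_rfl
        rw [show pvClosed mn (mn - 1) = (0,0,0,0) from by
          simp [pvClosed, show mn > mn - 1 from by omega]] at this
        exact this

-- ===== VERDICT (by name: the statement is the Claim_ definition above) =====
theorem sum_freq_odd_even_spec : Claim_equal_sum_freq_odd_even := by
  intro mn mx _
  unfold Spec_sum_freq_odd_even sum_freq_odd_even sum_freq_odd_even_alt
  rw [pvLoop_eq_closed]
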